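-- pv_equiv track=rewrite | github.com/theMike/FuaxPi | FuaxPi.py | do_danglers
-- ===== SOURCE A (Python) =====
-- risers =    ['b', 'd', 'f',
--              'h', 'k', 'l',
--              't']
--
-- danglers =  ['g', 'j', 'p',
--              'q', 'y']
--
-- def do_danglers(word):
--     r=0
--     d=0
--     wrd = list(word)
--     for r in range(len(word)):
--         if wrd[r] in risers:
--             for d in range(r,len(wrd)):
--                 if wrd[d] in danglers:
--                     wrd[d],wrd[r] = wrd[r],wrd[d]
--
--     return ''.join(wrd)
-- ===== SOURCE B (Python) =====
-- risers =    ['b', 'd', 'f',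
--              'h', 'k', 'l',
--              't']
--
-- danglers =  ['g', 'j', 'p',
--              'q', 'y']
--
-- def do_danglers(word):
--     wrd = list(word)
--     n = len(wrd)
--     for r in range(n):
--         if wrd[r] in risers:
--             idxs = [r] + [d for d in range(r + 1, n) if wrd[d] in danglers]
--             vals = [wrd[i] for i in idxs]
--             rot = [vals[-1]] + vals[:-1]
--             for i, v in zip(idxs, rot):
--                 wrd[i] = v
--     return ''.join(wrd)
-- ===== Notes on version B (the rewrite author's own statement) =====
-- stated objective: alternative
-- what changed: Replaces the inner cascading swap loop (which repeatedly swaps the riser slot with each later dangler) by a gather-then-rotate pass: collect the dangler positions after r once, then right-rotate the values at [r]+positions in a single write-back.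
import Mathlib
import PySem

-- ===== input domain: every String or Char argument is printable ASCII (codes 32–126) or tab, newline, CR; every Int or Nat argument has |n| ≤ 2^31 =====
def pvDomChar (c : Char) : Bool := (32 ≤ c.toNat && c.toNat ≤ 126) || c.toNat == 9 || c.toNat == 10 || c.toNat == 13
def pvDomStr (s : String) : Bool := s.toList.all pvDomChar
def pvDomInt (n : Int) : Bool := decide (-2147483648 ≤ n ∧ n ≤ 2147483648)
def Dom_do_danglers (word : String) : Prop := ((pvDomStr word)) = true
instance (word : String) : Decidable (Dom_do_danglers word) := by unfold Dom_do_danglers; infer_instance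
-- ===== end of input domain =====

-- B replaces A's inner cascading-swap loop by a gather-then-rotate pass (same asymptotic cost); return values proved equal on all inputs.

-- ===== PORT A =====
-- A transliterated: indices here are always in range (r, d come from range(len)), so
-- `getD _ ' '` is exactly Python's `wrd[i]`; `set` is exactly `wrd[i] = v`.
def pvRisers : List Char := ['b', 'd', 'f', 'h', 'k', 'l', 't']

def pvDanglers : List Char := ['g', 'j', 'p', 'q', 'y']

-- one step of A's inner `for d in range(r, len(wrd))` loop (simultaneous swap wrd[d],wrd[r] = wrd[r],wrd[d])
def pvStepA (r : Nat) (w : List Char) (d : Nat) : List Char :=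
  if w.getD d ' ' ∈ pvDanglers then (w.set d (w.getD r ' ')).set r (w.getD d ' ') else w

-- one step of A's outer `for r in range(len(word))` loop
def pvOuterA (w : List Char) (r : Nat) : List Char :=
  if w.getD r ' ' ∈ pvRisers then (List.range' r (w.length - r)).foldl (pvStepA r) w else w

def do_danglers (word : String) : String :=
  String.mk ((List.range word.toList.length).foldl pvOuterA word.toList)

-- ===== PORT B =====
-- B transliterated: gather idxs = [r] + dangler positions after r, right-rotate their values, write back.
def pvWriteB (w : List Char) (p : Nat × Char) : List Char := w.set p.1 p.2

def pvOuterB (w : List Char) (r : Nat) : List Char :=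
  if w.getD r ' ' ∈ pvRisers then
    let idxs := r :: (List.range' (r + 1) (w.length - (r + 1))).filter
                      (fun d => w.getD d ' ' ∈ pvDanglers)
    let vals := idxs.map (fun i => w.getD i ' ')
    let rot := vals.getLastD ' ' :: vals.dropLast
    (idxs.zip rot).foldl pvWriteB w
  else w

def do_danglers_alt (word : String) : String :=
  String.mk ((List.range word.toList.length).foldl pvOuterB word.toList)

-- ===== PRECONDITION & SPEC =====
def Spec_do_danglers (word : String) (out : String) : Prop := out = do_danglers_alt word
instance (word : String) (out : String) : Decidable (Spec_do_danglers word out) := by unfold Spec_do_danglers; infer_instance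

-- ===== CLAIM (what is proved, stated in full; the proofs are below) =====
def Claim_equal_do_danglers : Prop := ∀ (word : String), Dom_do_danglers word → Spec_do_danglers word (do_danglers word)

-- ===== LEMMAS AND PROOFS =====

-- B's rotate-and-write-back, abstracted over the gathered dangler-position list fs
def pvRot (w : List Char) (r : Nat) (fs : List Nat) : List Char :=
  let idxs := r :: fs
  let vals := idxs.map (fun i => w.getD i ' ')
  (idxs.zip (vals.getLastD ' ' :: vals.dropLast)).foldl pvWriteB w

theorem pvGetD_set_ne (l : List Char) (i j : Nat) (a : Char) (h : i ≠ j) :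
    (l.set i a).getD j ' ' = l.getD j ' ' := by
  simp [List.getD_eq_getElem?_getD, List.getElem?_set_ne h]

theorem pvGetD_set_self (l : List Char) (i : Nat) (a : Char) (h : i < l.length) :
    (l.set i a).getD i ' ' = a := by
  simp [List.getD_eq_getElem?_getD, h]

-- absorbing one swap of A into the rotation: rotating w' = swap(w,r,d) along [r]++fs
-- equals rotating w along [r,d]++fs
theorem pvRot_swap (w : List Char) (r d : Nat) (fs : List Nat)
    (hr : r < w.length) (hrd : r ≠ d) (hfs : ∀ x ∈ fs, x ≠ r ∧ x ≠ d) :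
    pvRot ((w.set d (w.getD r ' ')).set r (w.getD d ' ')) r fs
      = pvRot w r (d :: fs) := by
  have hmap : fs.map (fun i => ((w.set d (w.getD r ' ')).set r (w.getD d ' ')).getD i ' ')
      = fs.map (fun i => w.getD i ' ') := by
    apply List.map_congr_left
    intro x hx
    rcases hfs x hx with ⟨hxr, hxd⟩
    rw [pvGetD_set_ne _ _ _ _ (Ne.symm hxr), pvGetD_set_ne _ _ _ _ (Ne.symm hxd)]
  have hhead : ((w.set d (w.getD r ' ')).set r (w.getD d ' ')).getD r ' ' = w.getD d ' ' := by
    apply pvGetD_set_self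
    simpa using hr
  simp only [pvRot, List.map_cons, hmap, hhead]
  -- both sides: peel the head writes, remaining zip-folds coincide
  cases fs with
  | nil =>
      simp only [List.map_nil, List.getLastD, List.dropLast, List.zip, List.zipWith,
        List.foldl_cons, List.foldl_nil, pvWriteB, List.getLast]
      rw [List.set_set, List.set_comm _ _ hrd]
  | cons f fs' =>
      simp only [List.getLastD, List.dropLast_cons₂,
        List.zip_cons_cons, List.foldl_cons, pvWriteB]
      rw [List.set_set, List.set_comm _ _ hrd]
      simp

-- main inner-loop lemma: A's swap fold along candidate positions ds equals B's rotation
-- along the danglers of ds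
theorem pvInner_eq (r : Nat) :
    ∀ (ds : List Nat) (w : List Char), ds.Nodup →
      (∀ d ∈ ds, r < d ∧ d < w.length) → r < w.length →
      List.foldl (pvStepA r) w ds
        = pvRot w r (ds.filter (fun d => w.getD d ' ' ∈ pvDanglers)) := by
  intro ds
  induction ds with
  | nil =>
      intro w _ _ hr
      simp [pvRot, pvWriteB, List.getLastD, List.set_getElem_self,
        List.getD_eq_getElem?_getD, hr]
  | cons d ds ih =>
      intro w hnd hmem hr
      have hdr : r < d := (hmem d (by simp)).1
      have hdn : d ∉ ds := (List.nodup_cons.mp hnd).1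
      by_cases hc : w.getD d ' ' ∈ pvDanglers
      · have hstep : pvStepA r w d = (w.set d (w.getD r ' ')).set r (w.getD d ' ') := by
          unfold pvStepA; exact if_pos hc
        have hlen : ((w.set d (w.getD r ' ')).set r (w.getD d ' ')).length = w.length := by simp
        have ihw := ih ((w.set d (w.getD r ' ')).set r (w.getD d ' '))
          (List.nodup_cons.mp hnd).2
          (by intro x hx; rw [hlen]; exact hmem x (by simp [hx]))
          (by rw [hlen]; exact hr)
        have hfilt : ds.filter
            (fun x => ((w.set d (w.getD r ' ')).set r (w.getD d ' ')).getD x ' ' ∈ pvDanglers)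
            = ds.filter (fun x => w.getD x ' ' ∈ pvDanglers) := by
          apply List.filter_congr
          intro x hx
          have hxr : x ≠ r := Nat.ne_of_gt (hmem x (by simp [hx])).1
          have hxd : x ≠ d := fun h => hdn (h ▸ hx)
          rw [pvGetD_set_ne _ _ _ _ (Ne.symm hxr), pvGetD_set_ne _ _ _ _ (Ne.symm hxd)]
        have habs := pvRot_swap w r d (ds.filter (fun x => w.getD x ' ' ∈ pvDanglers)) hr
          (Nat.ne_of_lt hdr)
          (by
            intro x hx
            have hx' := List.mem_of_mem_filter hx
            exact ⟨Nat.ne_of_gt (hmem x (by simp [hx'])).1, fun h => hdn (h ▸ hx')⟩)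
        rw [List.foldl_cons, hstep, ihw, hfilt, habs,
          List.filter_cons_of_pos (by simpa using hc)]
      · have hstep : pvStepA r w d = w := by unfold pvStepA; exact if_neg hc
        rw [List.foldl_cons, hstep,
          ih w (List.nodup_cons.mp hnd).2 (fun x hx => hmem x (by simp [hx])) hr,
          List.filter_cons_of_neg (by simpa using hc)]

-- risers and danglers are disjoint
theorem pvRiser_not_dangler (c : Char) (h : c ∈ pvRisers) : c ∉ pvDanglers := by
  simp only [pvRisers, List.mem_cons, List.not_mem_nil, or_false] at h
  rcases h with rfl | rfl | rfl | rfl | rfl | rfl | rfl <;> decide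

-- one outer step of A equals one outer step of B
theorem pvOuter_eq (w : List Char) (r : Nat) (hr : r < w.length) :
    pvOuterA w r = pvOuterB w r := by
  by_cases hR : w.getD r ' ' ∈ pvRisers
  · have hrange : List.range' r (w.length - r) = r :: List.range' (r + 1) (w.length - (r + 1)) := by
      have h1 : w.length - r = (w.length - (r + 1)) + 1 := by omega
      rw [h1, List.range'_succ]
    have hfirst : pvStepA r w r = w := by
      unfold pvStepA; exact if_neg (pvRiser_not_dangler _ hR)
    have hinner := pvInner_eq r (List.range' (r + 1) (w.length - (r + 1))) w
      (List.nodup_range')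
      (by intro d hd; rw [List.mem_range'] at hd; omega) hr
    rw [pvOuterA, pvOuterB, if_pos hR, if_pos hR, hrange, List.foldl_cons, hfirst, hinner]
    rfl
  · rw [pvOuterA, pvOuterB, if_neg hR, if_neg hR]

theorem pvStepsA_length (r : Nat) :
    ∀ (ds : List Nat) (w : List Char), (List.foldl (pvStepA r) w ds).length = w.length := by
  intro ds
  induction ds with
  | nil => intro w; rfl
  | cons d ds ih =>
      intro w
      rw [List.foldl_cons, ih (pvStepA r w d)]
      unfold pvStepA
      split <;> simp

theorem pvOuterA_length (w : List Char) (r : Nat) : (pvOuterA w r).length = w.length := by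
  rw [pvOuterA]
  split
  · exact pvStepsA_length r _ w
  · rfl

theorem pvFold_eq (rs : List Nat) :
    ∀ (w : List Char), (∀ r ∈ rs, r < w.length) →
      rs.foldl pvOuterA w = rs.foldl pvOuterB w := by
  induction rs with
  | nil => intro w _; rfl
  | cons r rs ih =>
      intro w hmem
      have hr : r < w.length := hmem r (by simp)
      rw [List.foldl_cons, List.foldl_cons, ← pvOuter_eq w r hr,
        ih (pvOuterA w r) (by intro x hx; rw [pvOuterA_length]; exact hmem x (by simp [hx]))]

-- ===== VERDICT (by name: the statement is the Claim_ definition above) =====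
theorem do_danglers_spec : Claim_equal_do_danglers := by
  intro word _
  unfold Spec_do_danglers do_danglers do_danglers_alt
  rw [pvFold_eq]
  intro r hr
  rwa [List.mem_range] at hr
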